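-- pv_equiv track=rewrite | github.com/sarvex/python-leetcode | 3578.Count Partitions With Max-Min Difference at Most K.py | countPartitions
-- ===== SOURCE A (Python) =====
-- from typing import List
-- from collections import deque
--
-- def countPartitions(nums: List[int], k: int) -> int:
--     """
--     Count the number of ways to partition nums into contiguous segments
--     where each segment has max-min <= k.
--
--     Optimized Approach: Sliding Window + Monotonic Deques
--     - Use monotonic deques to maintain min/max in O(1) amortized time
--     - mxQueue: monotonic decreasing deque (max at front)
--     - mnQueue: monotonic increasing deque (min at front)
--     - cnt: running sum of valid partition counts in current window
--     - dp[i]: number of ways to partition nums[0:i]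
--
--     Time Complexity: O(n) - each element added/removed at most once
--     Space Complexity: O(n)
--     """
--     left = 0
--     cnt = 1  # Running sum of dp values in valid window
--     MOD = 1_000_000_007
--
--     # Monotonic deques for tracking min/max
--     mxQueue = deque()  # Decreasing: max at front
--     mnQueue = deque()  # Increasing: min at front
--     dp = [cnt]  # dp[i] = ways to partition nums[0:i]
--
--     for right, num in enumerate(nums):
--         # Maintain decreasing deque for maximum
--         while mxQueue and num > mxQueue[-1]:
--             mxQueue.pop()
--
--         # Maintain increasing deque for minimum
--         while mnQueue and num < mnQueue[-1]:
--             mnQueue.pop()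
--
--         mxQueue.append(num)
--         mnQueue.append(num)
--
--         # Shrink window while max-min constraint violated
--         while mxQueue[0] - mnQueue[0] > k:
--             cnt -= dp[left]
--
--             # Remove left element from deques if it's at front
--             if nums[left] == mxQueue[0]:
--                 mxQueue.popleft()
--             if nums[left] == mnQueue[0]:
--                 mnQueue.popleft()
--
--             left += 1
--
--         # Store number of ways to partition up to position right+1
--         dp.append(cnt)
--
--         # Update running count for next iteration
--         cnt *= 2
--         cnt %= MOD
--
--     return dp[-1] % MOD
-- ===== SOURCE B (Python) =====
-- def countPartitions(nums, k):
--     """Count partitions of nums into contiguous segments with max-min <= k.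
--
--     Direct quadratic DP with prefix running max/min instead of A's sliding
--     window with monotonic deques: dp[i] counts partitions of nums[:i];
--     for each i we scan the last segment's start j downward, maintaining the
--     running max/min, and stop as soon as the segment's spread exceeds k.
--     """
--     MOD = 1_000_000_007
--     dp = [1]
--     for i in range(1, len(nums) + 1):
--         total = 0
--         mx = mn = nums[i - 1]
--         for j in range(i - 1, -1, -1):
--             x = nums[j]
--             if x > mx:
--                 mx = x
--             if x < mn:
--                 mn = x
--             if mx - mn > k:
--                 break
--             total += dp[j]
--         dp.append(total % MOD)
--     return dp[-1]
-- ===== Notes on version B (the rewrite author's own statement) =====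
-- stated objective: simpler
-- what changed: Replaced the sliding-window running count with monotonic min/max deques by a direct quadratic DP that, for each position, scans the last segment's start downward while maintaining a running max/min and sums dp entries with an explicit modular prefix.
import Mathlib
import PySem

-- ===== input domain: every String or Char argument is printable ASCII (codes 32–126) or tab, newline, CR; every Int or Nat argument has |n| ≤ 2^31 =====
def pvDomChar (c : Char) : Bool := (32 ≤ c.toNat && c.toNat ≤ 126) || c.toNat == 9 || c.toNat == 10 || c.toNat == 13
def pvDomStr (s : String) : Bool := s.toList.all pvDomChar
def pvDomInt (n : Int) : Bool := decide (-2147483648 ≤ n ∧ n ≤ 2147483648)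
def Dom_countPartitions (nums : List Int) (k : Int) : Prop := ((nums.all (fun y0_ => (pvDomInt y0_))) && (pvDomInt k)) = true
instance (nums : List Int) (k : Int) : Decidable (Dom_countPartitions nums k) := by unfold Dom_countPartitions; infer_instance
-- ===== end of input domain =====

-- B replaces A's sliding window with monotonic deques by a direct quadratic DP
-- (downward scan with running max/min per position); return values agree wherever A returns.

-- ===== PORT A =====

def pvMOD : Int := 1000000007

-- 'while mxQueue and num > mxQueue[-1]: mxQueue.pop()' then 'mxQueue.append(num)'
def pushMax (q : List Int) (x : Int) : List Int :=
  (q.reverse.dropWhile (fun b => decide (b < x))).reverse ++ [x]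

-- 'while mnQueue and num < mnQueue[-1]: mnQueue.pop()' then 'mnQueue.append(num)'
def pushMin (q : List Int) (x : Int) : List Int :=
  (q.reverse.dropWhile (fun b => decide (x < b))).reverse ++ [x]

-- the 'while mxQueue[0] - mnQueue[0] > k' shrink loop; dp[left] and nums[left] are
-- in range whenever Python does not raise, so getD is exact there; fuel = dp.length
-- bounds the iteration count on every input satisfying Pre_ (Python raises IndexError
-- on an empty deque, which happens exactly outside Pre_).
def shrinkA (nums : List Int) (k : Int) (dp : List Int) :
    Nat → Nat → Int → List Int → List Int → Nat × Int × List Int × List Int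
  | 0, left, cnt, mx, mn => (left, cnt, mx, mn)
  | fuel + 1, left, cnt, mx, mn =>
    match mx, mn with
    | a :: mxt, b :: mnt =>
      if a - b > k then
        shrinkA nums k dp fuel (left + 1) (cnt - dp.getD left 0)
          (if nums.getD left 0 = a then mxt else a :: mxt)
          (if nums.getD left 0 = b then mnt else b :: mnt)
      else (left, cnt, a :: mxt, b :: mnt)
    | _, _ => (left, cnt, mx, mn)

-- one iteration of 'for right, num in enumerate(nums)'; state = (left, cnt, mxQueue, mnQueue, dp)
def stepA (nums : List Int) (k : Int)
    (st : Nat × Int × List Int × List Int × List Int) (num : Int) :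
    Nat × Int × List Int × List Int × List Int :=
  let mx := pushMax st.2.2.1 num
  let mn := pushMin st.2.2.2.1 num
  let dp := st.2.2.2.2
  let r := shrinkA nums k dp dp.length st.1 st.2.1 mx mn
  (r.1, PySem.Int.mod (r.2.1 * 2) pvMOD, r.2.2.1, r.2.2.2, dp ++ [r.2.1])

def countPartitions (nums : List Int) (k : Int) : Int :=
  let st := nums.foldl (stepA nums k) (0, 1, [], [], [1])
  PySem.Int.mod (PySem.List.pyGetD st.2.2.2.2 (-1) 0) pvMOD

-- ===== PORT B =====

-- inner 'for j in range(i - 1, -1, -1)' loop with break; fuel j+1 means index j is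
-- processed next (nums[j] and dp[j] are always in range, so getD is exact)
def innerB (nums : List Int) (k : Int) (dp : List Int) :
    Nat → Int → Int → Int → Int
  | 0, _, _, total => total
  | j + 1, mx, mn, total =>
    let x := nums.getD j 0
    let mx' := if x > mx then x else mx
    let mn' := if x < mn then x else mn
    if mx' - mn' > k then total
    else innerB nums k dp j mx' mn' (total + dp.getD j 0)

def countPartitions_alt (nums : List Int) (k : Int) : Int :=
  let dp := (List.range nums.length).foldl
    (fun dp i0 =>
      dp ++ [PySem.Int.mod (innerB nums k dp (i0 + 1) (nums.getD i0 0) (nums.getD i0 0) 0) pvMOD])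
    [1]
  PySem.List.pyGetD dp (-1) 0

-- ===== PRECONDITION & SPEC =====

-- A raises IndexError on nonempty nums with k < 0 (the shrink loop empties the deques
-- and then reads mxQueue[0]); Pre_ excludes exactly those inputs, nothing else.
def Pre_countPartitions (nums : List Int) (k : Int) : Prop := nums = [] ∨ 0 ≤ k
instance (nums : List Int) (k : Int) : Decidable (Pre_countPartitions nums k) := by
  unfold Pre_countPartitions; infer_instance

def pvWitness_countPartitions : List Int × Int := ([3, 1, 2], 1)

def Spec_countPartitions (nums : List Int) (k : Int) (out : Int) : Prop := out = countPartitions_alt nums k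
instance (nums : List Int) (k : Int) (out : Int) : Decidable (Spec_countPartitions nums k out) := by unfold Spec_countPartitions; infer_instance

-- ===== CLAIM (what is proved, stated in full; the proofs are below) =====
def Claim_equal_countPartitions : Prop := ∀ (nums : List Int) (k : Int), Dom_countPartitions nums k → Pre_countPartitions nums k → Spec_countPartitions nums k (countPartitions nums k)


-- ===== LEMMAS AND PROOFS =====

-- max / min of a nonempty list (value on [] is irrelevant, never used)
def wmax : List Int → Int
  | [] => 0
  | x :: l => if l.isEmpty then x else max x (wmax l)

def wmin : List Int → Int
  | [] => 0
  | x :: l => if l.isEmpty then x else min x (wmin l)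

def spread (w : List Int) : Int := wmax w - wmin w

-- the monotonic max-deque of a window, characterised structurally:
-- keep x iff no later element exceeds it
def Dmax : List Int → List Int
  | [] => []
  | x :: l => if l.isEmpty || decide (wmax l ≤ x) then x :: Dmax l else Dmax l

def Dmin : List Int → List Int
  | [] => []
  | x :: l => if l.isEmpty || decide (x ≤ wmin l) then x :: Dmin l else Dmin l

-- B's dp table after m outer iterations
def tableB (nums : List Int) (k : Int) : Nat → List Int
  | 0 => [1]
  | m + 1 =>
    let dp := tableB nums k m
    dp ++ [PySem.Int.mod (innerB nums k dp (m + 1) (nums.getD m 0) (nums.getD m 0) 0) pvMOD]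

-- the common specification value: number of valid partitions of nums[:i], mod pvMOD
def ways (nums : List Int) (k : Int) (i : Nat) : Int := (tableB nums k i).getLastD 0

theorem pvMOD_pos : (0 : Int) < pvMOD := by norm_num [pvMOD]

theorem mod_modeq (a : Int) : PySem.Int.mod a pvMOD ≡ a [ZMOD pvMOD] := by
  rw [PySem.Int.mod_eq_emod_of_pos pvMOD_pos]
  show a % pvMOD % pvMOD = a % pvMOD
  exact Int.emod_emod_of_dvd a dvd_rfl

theorem wmax_cons (x : Int) (l : List Int) (h : l ≠ []) : wmax (x :: l) = max x (wmax l) := by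
  cases l with
  | nil => exact absurd rfl h
  | cons a t => simp only [wmax, List.isEmpty_cons, if_neg Bool.false_ne_true]

theorem wmin_cons (x : Int) (l : List Int) (h : l ≠ []) : wmin (x :: l) = min x (wmin l) := by
  cases l with
  | nil => exact absurd rfl h
  | cons a t => simp only [wmin, List.isEmpty_cons, if_neg Bool.false_ne_true]

theorem wmax_append (w : List Int) (x : Int) :
    wmax (w ++ [x]) = if w.isEmpty then x else max (wmax w) x := by
  induction w with
  | nil => simp [wmax]
  | cons a w ih =>
    cases w with
    | nil => simp [wmax]
    | cons b t =>
      rw [List.cons_append, wmax_cons a _ (by simp), ih, wmax_cons a _ (by simp)]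
      simp only [List.isEmpty_cons, if_neg Bool.false_ne_true]
      rw [max_assoc]

theorem wmin_append (w : List Int) (x : Int) :
    wmin (w ++ [x]) = if w.isEmpty then x else min (wmin w) x := by
  induction w with
  | nil => simp [wmin]
  | cons a w ih =>
    cases w with
    | nil => simp [wmin]
    | cons b t =>
      rw [List.cons_append, wmin_cons a _ (by simp), ih, wmin_cons a _ (by simp)]
      simp only [List.isEmpty_cons, if_neg Bool.false_ne_true]
      rw [min_assoc]

theorem le_wmax_of_mem {b : Int} {w : List Int} (h : b ∈ w) : b ≤ wmax w := by
  induction w with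
  | nil => simp at h
  | cons a t ih =>
    rcases List.mem_cons.mp h with rfl | hm
    · cases t with
      | nil => simp [wmax]
      | cons c u => rw [wmax_cons _ _ (by simp)]; exact le_max_left _ _
    · have ht : t ≠ [] := by intro hc; rw [hc] at hm; simp at hm
      rw [wmax_cons _ _ ht]
      exact le_trans (ih hm) (le_max_right _ _)

theorem wmin_le_of_mem {b : Int} {w : List Int} (h : b ∈ w) : wmin w ≤ b := by
  induction w with
  | nil => simp at h
  | cons a t ih =>
    rcases List.mem_cons.mp h with rfl | hm
    · cases t with
      | nil => simp [wmin]
      | cons c u => rw [wmin_cons _ _ (by simp)]; exact min_le_left _ _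
    · have ht : t ≠ [] := by intro hc; rw [hc] at hm; simp at hm
      rw [wmin_cons _ _ ht]
      exact le_trans (min_le_right _ _) (ih hm)

theorem mem_of_mem_Dmax {b : Int} {w : List Int} (h : b ∈ Dmax w) : b ∈ w := by
  induction w with
  | nil => simp [Dmax] at h
  | cons a t ih =>
    rw [Dmax] at h
    split at h
    · rcases List.mem_cons.mp h with rfl | hm
      · exact List.mem_cons_self
      · exact List.mem_cons_of_mem _ (ih hm)
    · exact List.mem_cons_of_mem _ (ih h)

theorem mem_of_mem_Dmin {b : Int} {w : List Int} (h : b ∈ Dmin w) : b ∈ w := by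
  induction w with
  | nil => simp [Dmin] at h
  | cons a t ih =>
    rw [Dmin] at h
    split at h
    · rcases List.mem_cons.mp h with rfl | hm
      · exact List.mem_cons_self
      · exact List.mem_cons_of_mem _ (ih hm)
    · exact List.mem_cons_of_mem _ (ih h)

theorem Dmax_head (w : List Int) (h : w ≠ []) : ∃ t, Dmax w = wmax w :: t := by
  induction w with
  | nil => exact absurd rfl h
  | cons x l ih =>
    by_cases hl : l = []
    · subst hl
      exact ⟨[], by simp [Dmax, wmax]⟩
    · rw [Dmax, wmax_cons x l hl]
      by_cases hx : wmax l ≤ x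
      · refine ⟨Dmax l, ?_⟩
        rw [if_pos (by simp [hx]), max_eq_left hx]
      · obtain ⟨t, ht⟩ := ih hl
        refine ⟨t, ?_⟩
        rw [if_neg (by simp [hx, hl]), max_eq_right (by omega), ht]

theorem Dmin_head (w : List Int) (h : w ≠ []) : ∃ t, Dmin w = wmin w :: t := by
  induction w with
  | nil => exact absurd rfl h
  | cons x l ih =>
    by_cases hl : l = []
    · subst hl
      exact ⟨[], by simp [Dmin, wmin]⟩
    · rw [Dmin, wmin_cons x l hl]
      by_cases hx : x ≤ wmin l
      · refine ⟨Dmin l, ?_⟩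
        rw [if_pos (by simp [hx]), min_eq_left hx]
      · obtain ⟨t, ht⟩ := ih hl
        refine ⟨t, ?_⟩
        rw [if_neg (by simp [hx, hl]), min_eq_right (by omega), ht]

theorem pushMax_all {q : List Int} {x : Int} (h : ∀ b ∈ q, b < x) : pushMax q x = [x] := by
  unfold pushMax
  have : q.reverse.dropWhile (fun b => decide (b < x)) = [] := by
    rw [List.dropWhile_eq_nil_iff]
    intro b hb
    simpa using h b (List.mem_reverse.mp hb)
  rw [this]
  rfl

theorem pushMin_all {q : List Int} {x : Int} (h : ∀ b ∈ q, x < b) : pushMin q x = [x] := by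
  unfold pushMin
  have : q.reverse.dropWhile (fun b => decide (x < b)) = [] := by
    rw [List.dropWhile_eq_nil_iff]
    intro b hb
    simpa using h b (List.mem_reverse.mp hb)
  rw [this]
  rfl

theorem pushMax_cons {a x : Int} (q : List Int) (h : ¬ a < x) :
    pushMax (a :: q) x = a :: pushMax q x := by
  unfold pushMax
  rw [List.reverse_cons, List.dropWhile_append]
  by_cases he : (q.reverse.dropWhile (fun b => decide (b < x))).isEmpty
  · rw [if_pos he]
    have he' : q.reverse.dropWhile (fun b => decide (b < x)) = [] := by
      simpa [List.isEmpty_iff] using he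
    rw [he']
    simp [List.dropWhile, h]
  · rw [if_neg he, List.reverse_append]
    simp

theorem pushMin_cons {a x : Int} (q : List Int) (h : ¬ x < a) :
    pushMin (a :: q) x = a :: pushMin q x := by
  unfold pushMin
  rw [List.reverse_cons, List.dropWhile_append]
  by_cases he : (q.reverse.dropWhile (fun b => decide (x < b))).isEmpty
  · rw [if_pos he]
    have he' : q.reverse.dropWhile (fun b => decide (x < b)) = [] := by
      simpa [List.isEmpty_iff] using he
    rw [he']
    simp [List.dropWhile, h]
  · rw [if_neg he, List.reverse_append]
    simp

theorem Dmax_bound {b : Int} {w : List Int} (h : b ∈ Dmax w) : b ≤ wmax w :=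
  le_wmax_of_mem (mem_of_mem_Dmax h)

theorem Dmin_bound {b : Int} {w : List Int} (h : b ∈ Dmin w) : wmin w ≤ b :=
  wmin_le_of_mem (mem_of_mem_Dmin h)

theorem Dmax_push (w : List Int) (x : Int) : Dmax (w ++ [x]) = pushMax (Dmax w) x := by
  induction w with
  | nil => simp [Dmax, pushMax]
  | cons a w ih =>
    rw [List.cons_append, Dmax]
    by_cases hx : a < x
    · -- a is strictly below x: a never survives on either side
      have hcond : ((w ++ [x]).isEmpty || decide (wmax (w ++ [x]) ≤ a)) = false := by
        have h1 : x ≤ wmax (w ++ [x]) := le_wmax_of_mem (by simp)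
        simp only [Bool.or_eq_false_iff]
        constructor
        · simp
        · simp only [decide_eq_false_iff_not]
          omega
      rw [hcond]
      simp only [Bool.false_eq_true, if_false]
      rw [ih]
      -- RHS : pushMax (Dmax (a :: w)) x = pushMax (Dmax w) x
      rw [Dmax]
      by_cases hk : (w.isEmpty || decide (wmax w ≤ a)) = true
      · rw [hk]
        simp only [if_true]
        have hall : ∀ b ∈ a :: Dmax w, b < x := by
          intro b hb
          rcases List.mem_cons.mp hb with rfl | hm
          · exact hx
          · rcases Bool.or_eq_true_iff.mp hk with hw | hwa
            · rw [List.isEmpty_iff] at hw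
              rw [hw] at hm
              simp [Dmax] at hm
            · have := Dmax_bound hm
              have := of_decide_eq_true hwa
              omega
        have hall' : ∀ b ∈ Dmax w, b < x := fun b hb => hall b (List.mem_cons_of_mem _ hb)
        rw [pushMax_all hall, pushMax_all hall']
      · rw [Bool.not_eq_true] at hk
        rw [hk]
        simp only [Bool.false_eq_true, if_false]
    · -- x ≤ a : a survives iff it did before
      by_cases hk : (w.isEmpty || decide (wmax w ≤ a)) = true
      · have hcond : ((w ++ [x]).isEmpty || decide (wmax (w ++ [x]) ≤ a)) = true := by
          rw [wmax_append]
          rcases Bool.or_eq_true_iff.mp hk with hw | hwa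
          · rw [List.isEmpty_iff] at hw
            simp [hw]
            omega
          · have := of_decide_eq_true hwa
            by_cases hw : w = [] <;> simp [hw] <;> omega
        rw [hcond]
        simp only [if_true]
        rw [ih, Dmax, hk]
        simp only [if_true]
        rw [pushMax_cons _ hx]
      · rw [Bool.not_eq_true] at hk
        have hw : w ≠ [] := by
          intro hc
          rw [hc] at hk
          simp at hk
        have hwa : a < wmax w := by
          have := hk
          simp only [Bool.or_eq_false_iff, decide_eq_false_iff_not] at this
          omega
        have hcond : ((w ++ [x]).isEmpty || decide (wmax (w ++ [x]) ≤ a)) = false := by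
          rw [wmax_append]
          simp only [Bool.or_eq_false_iff]
          refine ⟨by simp, ?_⟩
          simp only [decide_eq_false_iff_not]
          have hwe : w.isEmpty = false := by
            cases w with
            | nil => exact absurd rfl hw
            | cons a t => rfl
          rw [hwe, if_neg Bool.false_ne_true]
          have := le_max_left (wmax w) x
          omega
        rw [hcond]
        simp only [Bool.false_eq_true, if_false]
        rw [ih, Dmax, hk]
        simp only [Bool.false_eq_true, if_false]

theorem Dmin_push (w : List Int) (x : Int) : Dmin (w ++ [x]) = pushMin (Dmin w) x := by
  induction w with
  | nil => simp [Dmin, pushMin]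
  | cons a w ih =>
    rw [List.cons_append, Dmin]
    by_cases hx : x < a
    · have hcond : ((w ++ [x]).isEmpty || decide (a ≤ wmin (w ++ [x]))) = false := by
        have h1 : wmin (w ++ [x]) ≤ x := by
          rw [wmin_append]
          by_cases hw : w = [] <;> simp [hw]
        simp only [Bool.or_eq_false_iff]
        constructor
        · simp
        · simp only [decide_eq_false_iff_not]
          omega
      rw [hcond]
      simp only [Bool.false_eq_true, if_false]
      rw [ih]
      rw [Dmin]
      by_cases hk : (w.isEmpty || decide (a ≤ wmin w)) = true
      · rw [hk]
        simp only [if_true]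
        have hall : ∀ b ∈ a :: Dmin w, x < b := by
          intro b hb
          rcases List.mem_cons.mp hb with rfl | hm
          · exact hx
          · rcases Bool.or_eq_true_iff.mp hk with hw | hwa
            · rw [List.isEmpty_iff] at hw
              rw [hw] at hm
              simp [Dmin] at hm
            · have := Dmin_bound hm
              have := of_decide_eq_true hwa
              omega
        have hall' : ∀ b ∈ Dmin w, x < b := fun b hb => hall b (List.mem_cons_of_mem _ hb)
        rw [pushMin_all hall, pushMin_all hall']
      · rw [Bool.not_eq_true] at hk
        rw [hk]
        simp only [Bool.false_eq_true, if_false]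
    · by_cases hk : (w.isEmpty || decide (a ≤ wmin w)) = true
      · have hcond : ((w ++ [x]).isEmpty || decide (a ≤ wmin (w ++ [x]))) = true := by
          rw [wmin_append]
          rcases Bool.or_eq_true_iff.mp hk with hw | hwa
          · rw [List.isEmpty_iff] at hw
            simp [hw]
            omega
          · have := of_decide_eq_true hwa
            by_cases hw : w = [] <;> simp [hw] <;> omega
        rw [hcond]
        simp only [if_true]
        rw [ih, Dmin, hk]
        simp only [if_true]
        rw [pushMin_cons _ hx]
      · rw [Bool.not_eq_true] at hk
        have hw : w ≠ [] := by
          intro hc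
          rw [hc] at hk
          simp at hk
        have hwa : wmin w < a := by
          have := hk
          simp only [Bool.or_eq_false_iff, decide_eq_false_iff_not] at this
          omega
        have hcond : ((w ++ [x]).isEmpty || decide (a ≤ wmin (w ++ [x]))) = false := by
          rw [wmin_append]
          simp only [Bool.or_eq_false_iff]
          refine ⟨by simp, ?_⟩
          simp only [decide_eq_false_iff_not]
          have hwe : w.isEmpty = false := by
            cases w with
            | nil => exact absurd rfl hw
            | cons a t => rfl
          rw [hwe, if_neg Bool.false_ne_true]
          have := min_le_left (wmin w) x
          omega
        rw [hcond]
        simp only [Bool.false_eq_true, if_false]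
        rw [ih, Dmin, hk]
        simp only [Bool.false_eq_true, if_false]

theorem Dmax_popleft (x : Int) (w : List Int) :
    (if x = wmax (x :: w) then (Dmax (x :: w)).tail else Dmax (x :: w)) = Dmax w := by
  by_cases hw : w = []
  · subst hw
    simp [Dmax, wmax]
  · rw [wmax_cons x w hw]
    by_cases hx : wmax w ≤ x
    · rw [if_pos (max_eq_left hx).symm, Dmax, if_pos (by simp [hx])]
      rfl
    · have h1 : max x (wmax w) = wmax w := max_eq_right (by omega)
      rw [h1, if_neg (by omega), Dmax, if_neg (by simp [hx, hw])]

theorem Dmin_popleft (x : Int) (w : List Int) :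
    (if x = wmin (x :: w) then (Dmin (x :: w)).tail else Dmin (x :: w)) = Dmin w := by
  by_cases hw : w = []
  · subst hw
    simp [Dmin, wmin]
  · rw [wmin_cons x w hw]
    by_cases hx : x ≤ wmin w
    · rw [if_pos (min_eq_left hx).symm, Dmin, if_pos (by simp [hx])]
      rfl
    · have h1 : min x (wmin w) = wmin w := min_eq_right (by omega)
      rw [h1, if_neg (by omega), Dmin, if_neg (by simp [hx, hw])]

theorem spread_singleton (x : Int) : spread [x] = 0 := by
  simp [spread, wmax, wmin]

theorem spread_cons_le (x : Int) (w : List Int) (h : w ≠ []) : spread w ≤ spread (x :: w) := by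
  unfold spread
  rw [wmax_cons x w h, wmin_cons x w h]
  have := le_max_right x (wmax w)
  have := min_le_right x (wmin w)
  omega

theorem spread_append_le (x : Int) (w : List Int) (h : w ≠ []) : spread w ≤ spread (w ++ [x]) := by
  unfold spread
  rw [wmax_append, wmin_append]
  have hw : w.isEmpty = false := by simpa [List.isEmpty_iff] using h
  rw [hw]
  simp only [Bool.false_eq_true, if_false]
  have := le_max_left (wmax w) x
  have := min_le_left (wmin w) x
  omega

theorem spread_drop_anti (l : List Int) (j j' : Nat) (h : j ≤ j') (h2 : j' < l.length) :
    spread (l.drop j') ≤ spread (l.drop j) := by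
  induction j' with
  | zero =>
    have : j = 0 := by omega
    subst this
    exact le_refl _
  | succ j' ih =>
    rcases Nat.eq_or_lt_of_le h with rfl | hlt
    · exact le_refl _
    · have hj' : j' < l.length := by omega
      have hcons : l.drop j' = l[j'] :: l.drop (j' + 1) := List.drop_eq_getElem_cons hj'
      have hne : l.drop (j' + 1) ≠ [] := by
        intro hc
        rw [List.drop_eq_nil_iff] at hc
        omega
      calc spread (l.drop (j' + 1)) ≤ spread (l.drop j') := by
            rw [hcons]
            exact spread_cons_le _ _ hne
        _ ≤ spread (l.drop j) := ih (by omega) hj'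

-- window slicing helpers
theorem seg_cons (nums : List Int) (i j : Nat) (h1 : j < i) (h2 : i ≤ nums.length) :
    (nums.take i).drop j = nums.getD j 0 :: (nums.take i).drop (j + 1) := by
  have hj : j < (nums.take i).length := by rw [List.length_take]; omega
  rw [List.drop_eq_getElem_cons hj]
  congr 1
  rw [List.getD_eq_getElem _ _ (show j < nums.length by omega)]
  exact List.getElem_take

theorem seg_ne_nil (nums : List Int) (i j : Nat) (h1 : j < i) (h2 : i ≤ nums.length) :
    (nums.take i).drop j ≠ [] := by
  intro hc
  rw [List.drop_eq_nil_iff, List.length_take] at hc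
  omega

theorem seg_last (nums : List Int) (m : Nat) (hm : m < nums.length) :
    (nums.take (m + 1)).drop m = [nums.getD m 0] := by
  rw [seg_cons nums (m + 1) m (by omega) (by omega)]
  congr 1
  rw [List.drop_eq_nil_iff, List.length_take]
  omega

theorem seg_append (nums : List Int) (m left : Nat) (hm : m < nums.length) (hl : left ≤ m) :
    (nums.take (m + 1)).drop left = (nums.take m).drop left ++ [nums.getD m 0] := by
  rw [List.take_succ, List.getElem?_eq_getElem hm]
  simp only [Option.toList_some]
  rw [List.drop_append_of_le_length (by rw [List.length_take]; omega)]
  rw [List.getD_eq_getElem _ _ hm]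

theorem tableB_length (nums : List Int) (k : Int) (m : Nat) : (tableB nums k m).length = m + 1 := by
  induction m with
  | zero => rfl
  | succ m ih => simp [tableB, ih]

theorem ways_zero (nums : List Int) (k : Int) : ways nums k 0 = 1 := rfl

theorem ways_succ (nums : List Int) (k : Int) (m : Nat) :
    ways nums k (m + 1) =
      PySem.Int.mod (innerB nums k (tableB nums k m) (m + 1) (nums.getD m 0) (nums.getD m 0) 0) pvMOD := by
  show (tableB nums k (m + 1)).getLastD 0 = _
  rw [tableB]
  simp

theorem tableB_getD (nums : List Int) (k : Int) {i m : Nat} (h : i ≤ m) :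
    (tableB nums k m).getD i 0 = ways nums k i := by
  induction m with
  | zero =>
    have : i = 0 := by omega
    subst this
    rfl
  | succ m ih =>
    rcases Nat.lt_or_ge i (m + 1) with h1 | h1
    · simp only [tableB]
      rw [List.getD_append _ _ _ _ (by rw [tableB_length]; omega)]
      exact ih (by omega)
    · have hi : i = m + 1 := by omega
      subst hi
      simp only [tableB]
      rw [List.getD_append_right _ _ _ _ (by rw [tableB_length]), tableB_length]
      simp only [Nat.sub_self]
      rw [ways_succ]
      rfl

theorem ways_bounds (nums : List Int) (k : Int) (i : Nat) :
    0 ≤ ways nums k i ∧ ways nums k i < pvMOD := by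
  cases i with
  | zero => norm_num [ways_zero, pvMOD]
  | succ m =>
    rw [ways_succ, PySem.Int.mod_eq_emod_of_pos pvMOD_pos]
    exact ⟨Int.emod_nonneg _ (by norm_num [pvMOD]), Int.emod_lt_of_pos _ pvMOD_pos⟩

theorem maxIf (a b : Int) : (if a < b then b else a) = max a b := by
  rw [max_def]
  split_ifs <;> omega

theorem minIf (a b : Int) : (if b < a then b else a) = min a b := by
  rw [min_def]
  split_ifs <;> omega

theorem innerB_spec (nums : List Int) (k : Int) (dp : List Int) (i : Nat)
    (hi : i ≤ nums.length) :
    ∀ j, j < i → ∀ total : Int,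
      innerB nums k dp j (wmax ((nums.take i).drop j)) (wmin ((nums.take i).drop j)) total
        = total + ∑ j' ∈ Finset.range j,
            (if spread ((nums.take i).drop j') ≤ k then dp.getD j' 0 else 0) := by
  intro j
  induction j with
  | zero =>
    intro _ total
    simp [innerB]
  | succ j ih =>
    intro hj total
    have hcons : (nums.take i).drop j = nums.getD j 0 :: (nums.take i).drop (j + 1) :=
      seg_cons nums i j (by omega) hi
    have hne : (nums.take i).drop (j + 1) ≠ [] := seg_ne_nil nums i (j + 1) (by omega) hi
    rw [innerB]
    simp only [gt_iff_lt]
    rw [maxIf, minIf]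
    have hmx : max (wmax ((nums.take i).drop (j + 1))) (nums.getD j 0) = wmax ((nums.take i).drop j) := by
      rw [hcons, wmax_cons _ _ hne, max_comm]
    have hmn : min (wmin ((nums.take i).drop (j + 1))) (nums.getD j 0) = wmin ((nums.take i).drop j) := by
      rw [hcons, wmin_cons _ _ hne, min_comm]
    rw [hmx, hmn]
    have hsp : spread ((nums.take i).drop j)
        = wmax ((nums.take i).drop j) - wmin ((nums.take i).drop j) := rfl
    by_cases hg : spread ((nums.take i).drop j) ≤ k
    · rw [if_neg (show ¬ k < wmax ((nums.take i).drop j) - wmin ((nums.take i).drop j) by omega)]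
      rw [ih (by omega) (total + dp.getD j 0)]
      rw [Finset.sum_range_succ, if_pos hg]
      ring
    · rw [if_pos (show k < wmax ((nums.take i).drop j) - wmin ((nums.take i).drop j) by omega)]
      have hz : ∀ j' ∈ Finset.range (j + 1),
          (if spread ((nums.take i).drop j') ≤ k then dp.getD j' 0 else 0) = 0 := by
        intro j' hj'
        rw [Finset.mem_range] at hj'
        have hmono : spread ((nums.take i).drop j) ≤ spread ((nums.take i).drop j') :=
          spread_drop_anti _ j' j (by omega) (by rw [List.length_take]; omega)
        rw [if_neg (by omega)]
      rw [Finset.sum_eq_zero hz, add_zero]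

theorem sum_if_Ico (m L : Nat) (f : Nat → Int) (P : Nat → Prop) [DecidablePred P]
    (hL : L ≤ m + 1)
    (hiff : ∀ j, j < m + 1 → (P j ↔ L ≤ j)) :
    ∑ j ∈ Finset.range (m + 1), (if P j then f j else 0) = ∑ j ∈ Finset.Ico L (m + 1), f j := by
  rw [Finset.range_eq_Ico, ← Finset.sum_Ico_consecutive _ (Nat.zero_le L) hL]
  have h1 : ∑ j ∈ Finset.Ico 0 L, (if P j then f j else 0) = 0 := by
    apply Finset.sum_eq_zero
    intro j hj
    rw [Finset.mem_Ico] at hj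
    have : ¬ P j := by rw [hiff j (by omega)]; omega
    simp [this]
  have h2 : ∑ j ∈ Finset.Ico L (m + 1), (if P j then f j else 0) = ∑ j ∈ Finset.Ico L (m + 1), f j := by
    apply Finset.sum_congr rfl
    intro j hj
    rw [Finset.mem_Ico] at hj
    have : P j := by rw [hiff j hj.2]; exact hj.1
    simp [this]
  rw [h1, h2, zero_add]

theorem ways_succ_sum (nums : List Int) (k : Int) (m L : Nat) (hk : 0 ≤ k)
    (hm : m < nums.length) (hL : L ≤ m)
    (hv : spread ((nums.take (m + 1)).drop L) ≤ k)
    (hmin : L = 0 ∨ k < spread ((nums.take (m + 1)).drop (L - 1))) :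
    ways nums k (m + 1) =
      PySem.Int.mod (∑ j ∈ Finset.Ico L (m + 1), ways nums k j) pvMOD := by
  have hlen : (nums.take (m + 1)).length = m + 1 := by rw [List.length_take]; omega
  have hseg : (nums.take (m + 1)).drop m = [nums.getD m 0] := seg_last nums m hm
  have hwx : wmax ((nums.take (m + 1)).drop m) = nums.getD m 0 := by rw [hseg]; rfl
  have hwn : wmin ((nums.take (m + 1)).drop m) = nums.getD m 0 := by rw [hseg]; rfl
  have hvm : spread ((nums.take (m + 1)).drop m) ≤ k := by rw [hseg, spread_singleton]; exact hk
  rw [ways_succ]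
  -- unfold the first inner-loop step (index m): it always passes since the segment is a singleton
  have e : innerB nums k (tableB nums k m) (m + 1) (nums.getD m 0) (nums.getD m 0) 0
      = innerB nums k (tableB nums k m) m (nums.getD m 0) (nums.getD m 0)
          (0 + (tableB nums k m).getD m 0) := by
    rw [innerB]
    simp only [gt_iff_lt, lt_self_iff_false, if_false, sub_self]
    rw [if_neg (show ¬ k < 0 by omega)]
  have hspec := innerB_spec nums k (tableB nums k m) (m + 1) (by omega) m (by omega)
    (0 + (tableB nums k m).getD m 0)
  rw [hwx, hwn] at hspec
  rw [e, hspec]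
  -- fold the first step back into the range-(m+1) sum
  have hstep : (0 : Int) + (tableB nums k m).getD m 0
      + ∑ j' ∈ Finset.range m, (if spread ((nums.take (m + 1)).drop j') ≤ k then (tableB nums k m).getD j' 0 else 0)
      = ∑ j' ∈ Finset.range (m + 1), (if spread ((nums.take (m + 1)).drop j') ≤ k then (tableB nums k m).getD j' 0 else 0) := by
    rw [Finset.sum_range_succ, if_pos hvm]
    ring
  rw [hstep]
  have hiff : ∀ j, j < m + 1 → ((spread ((nums.take (m + 1)).drop j) ≤ k) ↔ L ≤ j) := by
    intro j hj
    constructor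
    · intro hPj
      by_contra hLe
      push_neg at hLe
      rcases hmin with rfl | hmin
      · omega
      · have : spread ((nums.take (m + 1)).drop (L - 1)) ≤ spread ((nums.take (m + 1)).drop j) :=
          spread_drop_anti _ j (L - 1) (by omega) (by omega)
        omega
    · intro hLj
      have : spread ((nums.take (m + 1)).drop j) ≤ spread ((nums.take (m + 1)).drop L) :=
        spread_drop_anti _ L j hLj (by omega)
      omega
  have hconv := sum_if_Ico m L (fun j => (tableB nums k m).getD j 0) _ (by omega) hiff
  rw [hconv]
  congr 1
  apply Finset.sum_congr rfl
  intro j hj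
  rw [Finset.mem_Ico] at hj
  exact tableB_getD nums k (by omega)

theorem shrinkA_spec (nums : List Int) (k : Int) (dp : List Int) (m : Nat)
    (hk : 0 ≤ k) (hm : m < nums.length) (hdplen : dp.length = m + 1)
    (hdp : ∀ i1, i1 < m + 1 → dp.getD i1 0 ≡ ways nums k i1 [ZMOD pvMOD]) :
    ∀ fuel left cnt, left ≤ m → m + 1 ≤ fuel + left →
      (cnt ≡ ∑ j ∈ Finset.Ico left (m + 1), ways nums k j [ZMOD pvMOD]) →
      (left = 0 ∨ k < spread ((nums.take (m + 1)).drop (left - 1))) →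
      ∃ L c, shrinkA nums k dp fuel left cnt (Dmax ((nums.take (m + 1)).drop left))
               (Dmin ((nums.take (m + 1)).drop left))
             = (L, c, Dmax ((nums.take (m + 1)).drop L), Dmin ((nums.take (m + 1)).drop L))
          ∧ L ≤ m ∧ spread ((nums.take (m + 1)).drop L) ≤ k
          ∧ (L = 0 ∨ k < spread ((nums.take (m + 1)).drop (L - 1)))
          ∧ (c ≡ ∑ j ∈ Finset.Ico L (m + 1), ways nums k j [ZMOD pvMOD]) := by
  intro fuel
  induction fuel with
  | zero =>
    intro left cnt hleft hfuel _ _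
    omega
  | succ fuel ih =>
    intro left cnt hleft hfuel hcnt hmin
    have hw : (nums.take (m + 1)).drop left ≠ [] := seg_ne_nil nums (m + 1) left (by omega) (by omega)
    obtain ⟨tx, htx⟩ := Dmax_head _ hw
    obtain ⟨tn, htn⟩ := Dmin_head _ hw
    rw [htx, htn, shrinkA]
    by_cases hg : wmax ((nums.take (m + 1)).drop left) - wmin ((nums.take (m + 1)).drop left) > k
    · rw [if_pos hg]
      -- the window is not a singleton, so left < m
      have hlm : left < m := by
        rcases Nat.eq_or_lt_of_le hleft with rfl | h
        · exfalso
          have := seg_last nums left hm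
          rw [this] at hg
          simp [wmax, wmin] at hg
          omega
        · omega
      have hcons : (nums.take (m + 1)).drop left = nums.getD left 0 :: (nums.take (m + 1)).drop (left + 1) :=
        seg_cons nums (m + 1) left (by omega) (by omega)
      -- the popped deques are the deques of the shrunk window
      have hmx2 : (if nums.getD left 0 = wmax ((nums.take (m + 1)).drop left) then tx else wmax ((nums.take (m + 1)).drop left) :: tx)
          = Dmax ((nums.take (m + 1)).drop (left + 1)) := by
        have := Dmax_popleft (nums.getD left 0) ((nums.take (m + 1)).drop (left + 1))
        rw [← hcons] at this
        rw [htx] at this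
        simpa using this
      have hmn2 : (if nums.getD left 0 = wmin ((nums.take (m + 1)).drop left) then tn else wmin ((nums.take (m + 1)).drop left) :: tn)
          = Dmin ((nums.take (m + 1)).drop (left + 1)) := by
        have := Dmin_popleft (nums.getD left 0) ((nums.take (m + 1)).drop (left + 1))
        rw [← hcons] at this
        rw [htn] at this
        simpa using this
      rw [hmx2, hmn2]
      -- new count congruence
      have hcnt' : cnt - dp.getD left 0 ≡ ∑ j ∈ Finset.Ico (left + 1) (m + 1), ways nums k j [ZMOD pvMOD] := by
        have h1 : cnt - dp.getD left 0
            ≡ (∑ j ∈ Finset.Ico left (m + 1), ways nums k j) - ways nums k left [ZMOD pvMOD] :=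
          Int.ModEq.sub hcnt (hdp left (by omega))
        rw [Finset.sum_eq_sum_Ico_succ_bot (show left < m + 1 by omega)] at h1
        rw [add_sub_cancel_left] at h1
        exact h1
      exact ih (left + 1) (cnt - dp.getD left 0) (by omega) (by omega) hcnt'
        (Or.inr (by simpa using hg))
    · rw [if_neg hg]
      refine ⟨left, cnt, ?_, by omega, ?_, hmin, hcnt⟩
      · rw [htx, htn]
      · have : spread ((nums.take (m + 1)).drop left)
            = wmax ((nums.take (m + 1)).drop left) - wmin ((nums.take (m + 1)).drop left) := rfl
        omega

-- the outer-loop invariant for A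
def InvA (nums : List Int) (k : Int) (m : Nat)
    (st : Nat × Int × List Int × List Int × List Int) : Prop :=
  st.1 ≤ m ∧ (0 < m → st.1 < m)
  ∧ st.2.2.1 = Dmax ((nums.take m).drop st.1)
  ∧ st.2.2.2.1 = Dmin ((nums.take m).drop st.1)
  ∧ st.2.2.2.2.length = m + 1
  ∧ (∀ i, i < m + 1 → st.2.2.2.2.getD i 0 ≡ ways nums k i [ZMOD pvMOD])
  ∧ (st.2.1 ≡ ∑ j ∈ Finset.Ico st.1 (m + 1), ways nums k j [ZMOD pvMOD])
  ∧ (st.1 = 0 ∨ k < spread ((nums.take m).drop (st.1 - 1)))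
  ∧ (0 < m → spread ((nums.take m).drop st.1) ≤ k)

theorem stepA_inv (nums : List Int) (k : Int) (m : Nat) (st : Nat × Int × List Int × List Int × List Int)
    (hk : 0 ≤ k) (hm : m < nums.length) (hinv : InvA nums k m st) :
    InvA nums k (m + 1) (stepA nums k st (nums.getD m 0)) := by
  obtain ⟨left, cnt, mxq, mnq, dp⟩ := st
  obtain ⟨h1, h2, h3, h4, h5, h6, h7, h8, _h9⟩ := hinv
  simp only at h1 h2 h3 h4 h5 h6 h7 h8
  -- the pushed deques are the deques of the extended window
  have hseg : (nums.take (m + 1)).drop left = (nums.take m).drop left ++ [nums.getD m 0] :=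
    seg_append nums m left hm h1
  have hpm : pushMax mxq (nums.getD m 0) = Dmax ((nums.take (m + 1)).drop left) := by
    rw [h3, hseg, Dmax_push]
  have hpn : pushMin mnq (nums.getD m 0) = Dmin ((nums.take (m + 1)).drop left) := by
    rw [h4, hseg, Dmin_push]
  -- the minimality fact transfers to the extended window
  have hmin0 : left = 0 ∨ k < spread ((nums.take (m + 1)).drop (left - 1)) := by
    by_cases hl0 : left = 0
    · exact Or.inl hl0
    · right
      rcases h8 with h8 | h8
      · exact absurd h8 hl0
      have hlm2 : left < m := h2 (by omega)
      have hseg2 : (nums.take (m + 1)).drop (left - 1) = (nums.take m).drop (left - 1) ++ [nums.getD m 0] :=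
        seg_append nums m (left - 1) hm (by omega)
      have hne : (nums.take m).drop (left - 1) ≠ [] := seg_ne_nil nums m (left - 1) (by omega) (by omega)
      have := spread_append_le (nums.getD m 0) _ hne
      rw [hseg2]
      omega
  obtain ⟨L, c, heq, hL, hv, hmin', hc⟩ :=
    shrinkA_spec nums k dp m hk hm h5 h6 (m + 1) left cnt h1 (by omega) h7 hmin0
  have hways : c ≡ ways nums k (m + 1) [ZMOD pvMOD] := by
    have hws := ways_succ_sum nums k m L hk hm hL hv hmin'
    calc c ≡ ∑ j ∈ Finset.Ico L (m + 1), ways nums k j [ZMOD pvMOD] := hc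
      _ ≡ ways nums k (m + 1) [ZMOD pvMOD] := by
          rw [hws]
          exact (mod_modeq _).symm
  have hstep : stepA nums k (left, cnt, mxq, mnq, dp) (nums.getD m 0)
      = (L, PySem.Int.mod (c * 2) pvMOD, Dmax ((nums.take (m + 1)).drop L),
          Dmin ((nums.take (m + 1)).drop L), dp ++ [c]) := by
    unfold stepA
    simp only
    rw [hpm, hpn, h5, heq]
  rw [hstep]
  refine ⟨by omega, by omega, rfl, rfl, by simp [h5], ?_, ?_, ?_, fun _ => hv⟩
  · -- dp entries
    intro i hi
    simp only
    rcases Nat.lt_or_ge i (m + 1) with hi1 | hi1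
    · rw [List.getD_append _ _ _ _ (by omega)]
      exact h6 i hi1
    · have : i = m + 1 := by omega
      subst this
      rw [List.getD_append_right _ _ _ _ (by omega), h5]
      simp only [Nat.sub_self]
      exact hways
  · -- count congruence
    simp only
    calc PySem.Int.mod (c * 2) pvMOD ≡ c * 2 [ZMOD pvMOD] := mod_modeq _
      _ ≡ (∑ j ∈ Finset.Ico L (m + 1), ways nums k j) + ways nums k (m + 1) [ZMOD pvMOD] := by
          rw [mul_two]
          exact Int.ModEq.add hc hways
      _ = ∑ j ∈ Finset.Ico L (m + 2), ways nums k j :=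
          (Finset.sum_Ico_succ_top (by omega) _).symm
  · -- minimality
    simp only
    exact hmin'

theorem foldl_inv (nums : List Int) (k : Int) (hk : 0 ≤ k) :
    ∀ m, m ≤ nums.length → InvA nums k m ((nums.take m).foldl (stepA nums k) (0, 1, [], [], [1])) := by
  intro m
  induction m with
  | zero =>
    intro _
    refine ⟨le_refl 0, by omega, rfl, rfl, rfl, ?_, ?_, Or.inl rfl, by omega⟩
    · intro i hi
      interval_cases i
      show (1 : Int) ≡ ways nums k 0 [ZMOD pvMOD]
      rw [ways_zero]
    · show (1 : Int) ≡ ∑ j ∈ Finset.Ico 0 1, ways nums k j [ZMOD pvMOD]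
      have : ∑ j ∈ Finset.Ico 0 1, ways nums k j = ways nums k 0 := by simp
      rw [this, ways_zero]
  | succ m ih =>
    intro hm
    rw [List.take_succ, List.getElem?_eq_getElem (show m < nums.length by omega)]
    simp only [Option.toList_some]
    rw [List.foldl_append]
    simp only [List.foldl_cons, List.foldl_nil]
    have h := stepA_inv nums k m _ hk (by omega) (ih (by omega))
    rw [List.getD_eq_getElem _ _ (by omega)] at h
    exact h

theorem foldl_tableB (nums : List Int) (k : Int) (m : Nat) :
    (List.range m).foldl
      (fun dp i0 =>
        dp ++ [PySem.Int.mod (innerB nums k dp (i0 + 1) (nums.getD i0 0) (nums.getD i0 0) 0) pvMOD])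
      [1] = tableB nums k m := by
  induction m with
  | zero => rfl
  | succ m ih =>
    rw [List.range_succ, List.foldl_append, ih]
    rfl

theorem alt_eq_ways (nums : List Int) (k : Int) : countPartitions_alt nums k = ways nums k nums.length := by
  unfold countPartitions_alt
  simp only
  rw [foldl_tableB]
  have hne : tableB nums k nums.length ≠ [] := by
    intro hc
    have := tableB_length nums k nums.length
    rw [hc] at this
    simp at this
  rw [PySem.List.pyGetD_neg_one _ _ hne]
  unfold ways
  rw [List.getLastD_eq_getLast?, List.getLast?_eq_some_getLast hne]
  rfl

theorem getLast_eq_getD (l : List Int) (h : l ≠ []) : l.getLast h = l.getD (l.length - 1) 0 := by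
  rw [List.getLast_eq_getElem, List.getD_eq_getElem _ _ (by
    have := List.length_pos_iff.mpr h
    omega)]

-- ===== VERDICT (by name: the statement is the Claim_ definition above) =====
theorem countPartitions_spec : Claim_equal_countPartitions := by
  intro nums k _ hpre
  unfold Spec_countPartitions
  rw [alt_eq_ways]
  rcases hpre with rfl | hk
  · rfl
  · have hinv := foldl_inv nums k hk nums.length le_rfl
    rw [List.take_length] at hinv
    obtain ⟨-, -, -, -, h5, h6, -, -, -⟩ := hinv
    unfold countPartitions
    simp only
    set dp := (nums.foldl (stepA nums k) (0, 1, [], [], [1])).2.2.2.2 with hdp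
    have hne : dp ≠ [] := by
      intro hc
      rw [hc] at h5
      simp at h5
    rw [PySem.List.pyGetD_neg_one _ _ hne]
    rw [getLast_eq_getD dp hne, h5]
    simp only [Nat.add_sub_cancel]
    have h6' : dp.getD nums.length 0 % pvMOD = ways nums k nums.length % pvMOD :=
      h6 nums.length (by omega)
    rw [PySem.Int.mod_eq_emod_of_pos pvMOD_pos, h6',
      Int.emod_eq_of_lt (ways_bounds nums k nums.length).1 (ways_bounds nums k nums.length).2]
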